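-- pv_equiv track=rewrite | github.com/pombredanne/dockerfile-parser | dockerfile_parser/parser.py | _parse_raw_dockerfile
-- ===== SOURCE A (Python) =====
-- def _parse_raw_dockerfile(lines):
--     """
--     Author: Michal Papierski <michal@papierski.net>
--     https://github.com/mpapierski/dockerfile-parser
--     """
--
--     result, current_line = [], []
--     for line in lines:
--         if line.startswith('#') or not line.strip():
--             continue
--         current_line.append(line)
--         if line.rstrip()[-1] != '\\':
--             result.append(''.join(current_line))
--             current_line = []
--
--     return result
-- ===== SOURCE B (Python) =====
-- def _parse_raw_dockerfile(lines):
--     kept = [l for l in lines if l.strip() and not l.startswith('#')]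
--     result, start = [], 0
--     for j, l in enumerate(kept):
--         if l.rstrip()[-1] != '\\':
--             result.append(''.join(kept[start:j + 1]))
--             start = j + 1
--     return result
-- ===== Notes on version B (the rewrite author's own statement) =====
-- stated objective: alternative
-- what changed: Replaces the single pass with a mutable current_line buffer by a two-phase decomposition: filter out comments/blank lines once, then recursively split the kept lines at the first non-continued line, joining each slice.
import Mathlib
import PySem

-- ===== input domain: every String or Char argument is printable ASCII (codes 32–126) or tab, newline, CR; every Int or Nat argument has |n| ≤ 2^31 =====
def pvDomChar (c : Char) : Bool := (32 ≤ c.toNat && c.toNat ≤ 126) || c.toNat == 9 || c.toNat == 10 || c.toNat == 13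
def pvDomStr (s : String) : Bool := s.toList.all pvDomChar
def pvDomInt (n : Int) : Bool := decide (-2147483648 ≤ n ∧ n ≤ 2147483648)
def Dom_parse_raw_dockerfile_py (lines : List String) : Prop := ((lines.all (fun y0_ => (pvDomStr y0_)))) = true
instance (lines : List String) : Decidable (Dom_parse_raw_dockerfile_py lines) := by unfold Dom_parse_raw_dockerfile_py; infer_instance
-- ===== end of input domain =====

-- B replaces A's single pass with a mutable join buffer by a two-phase decomposition
-- (filter comments/blanks once, then recursively split at each non-continued line); alternative, not faster.


-- ===== PORT A =====
-- one loop step of A: skip comments/blanks, else accumulate, flush on a non-continued line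
def pvStepA (st : List String × List String) (line : String) : List String × List String :=
  if PySem.Str.startswith line "#" || (PySem.Str.strip line == "") then st
  else
    let cur := st.2 ++ [line]
    -- line.rstrip()[-1] != '\\'  (pyGet? (-1) is exact; the none case is unreachable: strip line ≠ "")
    if PySem.Str.pyGet? (PySem.Str.rstrip line) (-1) ≠ some '\\' then
      (st.1 ++ [PySem.Str.join "" cur], [])
    else (st.1, cur)

def parse_raw_dockerfile_py (lines : List String) : List String :=
  (lines.foldl pvStepA ([], [])).1

-- ===== PORT B =====
def pvKeepB (l : String) : Bool := !(PySem.Str.strip l == "") && !PySem.Str.startswith l "#"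

-- l.rstrip()[-1] != '\\'
def pvTermB (l : String) : Bool := PySem.Str.pyGet? (PySem.Str.rstrip l) (-1) ≠ some '\\'

-- Source B's main loop: one enumerate pass over the kept lines, emitting the slice
-- kept[start:j+1] at each terminating line and advancing start
def pvStepB (kept : List String) (st : List String × Int) (p : Int × String) :
    List String × Int :=
  if pvTermB p.2 then
    (st.1 ++ [PySem.Str.join "" (PySem.List.slice kept (some st.2) (some (p.1 + 1)))], p.1 + 1)
  else st

def parse_raw_dockerfile_py_alt (lines : List String) : List String :=
  let kept := lines.filter pvKeepB
  ((PySem.List.enumerate kept 0).foldl (pvStepB kept) ([], 0)).1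

-- ===== PRECONDITION & SPEC =====
def Spec_parse_raw_dockerfile_py (lines : List String) (out : List String) : Prop := out = parse_raw_dockerfile_py_alt lines
instance (lines : List String) (out : List String) : Decidable (Spec_parse_raw_dockerfile_py lines out) := by unfold Spec_parse_raw_dockerfile_py; infer_instance

-- ===== CLAIM (what is proved, stated in full; the proofs are below) =====
def Claim_equal_parse_raw_dockerfile_py : Prop := ∀ (lines : List String), Dom_parse_raw_dockerfile_py lines → Spec_parse_raw_dockerfile_py lines (parse_raw_dockerfile_py lines)

-- ===== LEMMAS AND PROOFS =====

-- A's step is the identity exactly on the lines B's filter drops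
theorem pvStepA_skip (st : List String × List String) (l : String) (h : pvKeepB l = false) :
    pvStepA st l = st := by
  have hcond : (PySem.Str.startswith l "#" || (PySem.Str.strip l == "")) = true := by
    unfold pvKeepB at h
    have hb : ∀ (a b : Bool), (!a && !b) = false → (b || a) = true := by decide
    exact hb _ _ h
  unfold pvStepA
  split_ifs
  rfl

-- A's fold factors through B's filter
theorem pvFoldA_filter (lines : List String) (st : List String × List String) :
    lines.foldl pvStepA st = (lines.filter pvKeepB).foldl pvStepA st := by
  induction lines generalizing st with
  | nil => rfl
  | cons l rest ih =>
    by_cases h : pvKeepB l = true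
    · simp [h, List.foldl_cons, ih]
    · simp only [Bool.not_eq_true] at h
      simp [h, List.foldl_cons, pvStepA_skip st l h, ih]

-- A's fold restructured as a recursion over the kept lines with an explicit buffer
def pvG (cur : List String) : List String → List String
  | [] => []
  | l :: rest =>
    if pvTermB l then PySem.Str.join "" (cur ++ [l]) :: pvG [] rest
    else pvG (cur ++ [l]) rest

theorem pvFoldA_eq_pvG (kept : List String) (res cur : List String)
    (hk : ∀ l ∈ kept, pvKeepB l = true) :
    (kept.foldl pvStepA (res, cur)).1 = res ++ pvG cur kept := by
  induction kept generalizing res cur with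
  | nil => simp [pvG]
  | cons l rest ih =>
    have hl : pvKeepB l = true := hk l (List.mem_cons_self ..)
    have hrest : ∀ x ∈ rest, pvKeepB x = true := fun x hx => hk x (List.mem_cons_of_mem _ hx)
    have hskip : (PySem.Str.startswith l "#" || (PySem.Str.strip l == "")) = false := by
      unfold pvKeepB at hl
      have hb : ∀ (a b : Bool), (!a && !b) = true → (b || a) = false := by decide
      exact hb _ _ hl
    rw [List.foldl_cons]
    by_cases ht : PySem.Str.pyGet? (PySem.Str.rstrip l) (-1) = some '\\'
    · -- continued line: buffer grows
      have htB : pvTermB l = false := by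
        simp only [pvTermB, decide_eq_false_iff_not, not_not]; exact ht
      have hA : pvStepA (res, cur) l = (res, cur ++ [l]) := by
        unfold pvStepA
        split_ifs with h1 h2
        · rw [hskip] at h1; exact absurd h1 (by decide)
        · exact absurd ht h2
        · rfl
      rw [hA, ih _ _ hrest]
      simp only [pvG, htB, Bool.false_eq_true, if_false]
    · -- terminating line: flush the buffer
      have htB : pvTermB l = true := by
        simp only [pvTermB, decide_eq_true_eq]; exact ht
      have hA : pvStepA (res, cur) l =
          (res ++ [PySem.Str.join "" (cur ++ [l])], []) := by
        unfold pvStepA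
        split_ifs with h1
        · rw [hskip] at h1; exact absurd h1 (by decide)
        · rfl
      rw [hA, ih _ _ hrest]
      simp only [pvG, htB, if_true, List.append_assoc, List.singleton_append]

-- B's slice-emitting pass equals the buffer recursion: with kept = pre ++ rest, start
-- positions into pre, and the pending buffer is exactly pre.drop start
theorem pvFoldB_eq_pvG (rest : List String) (pre res : List String) (start : Nat)
    (hs : start ≤ pre.length) :
    ((PySem.List.enumerate rest (pre.length : Int)).foldl
        (pvStepB (pre ++ rest)) (res, (start : Int))).1
      = res ++ pvG (pre.drop start) rest := by
  induction rest generalizing pre res start with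
  | nil => simp [PySem.List.enumerate_nil, pvG]
  | cons l rest' ih =>
    rw [PySem.List.enumerate_cons, List.foldl_cons]
    have hslice : PySem.List.slice (pre ++ l :: rest') (some (start : Int))
        (some ((pre.length : Int) + 1)) = pre.drop start ++ [l] := by
      have h1 : ((pre.length : Int) + 1) = ((pre.length + 1 : Nat) : Int) := by push_cast; ring
      rw [h1, PySem.List.slice_natCast]
      rw [List.drop_append_of_le_length hs]
      have h2 : pre.length + 1 - start = (pre.drop start).length + 1 := by
        simp [List.length_drop]; omega
      rw [h2, List.take_append]
      simp [List.take_of_length_le]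
    by_cases htB : pvTermB l = true
    · simp only [pvStepB, htB, if_true, hslice]
      have hcast : (pre.length : Int) + 1 = (((pre ++ [l]).length : Nat) : Int) := by
        simp only [List.length_append, List.length_cons, List.length_nil]; omega
      have hre : pre ++ l :: rest' = (pre ++ [l]) ++ rest' := by simp
      rw [hcast, hre, ih (pre ++ [l]) _ ((pre ++ [l]).length) le_rfl]
      simp [pvG, htB, List.append_assoc]
    · simp only [Bool.not_eq_true] at htB
      simp only [pvStepB, htB, Bool.false_eq_true, if_false]
      have hcast : (pre.length : Int) + 1 = (((pre ++ [l]).length : Nat) : Int) := by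
        simp only [List.length_append, List.length_cons, List.length_nil]; omega
      have hre : pre ++ l :: rest' = (pre ++ [l]) ++ rest' := by simp
      rw [hcast, hre, ih (pre ++ [l]) _ start (le_trans hs (by simp))]
      rw [List.drop_append_of_le_length hs]
      simp [pvG, htB]

theorem parse_raw_dockerfile_py_spec : Claim_equal_parse_raw_dockerfile_py := by
  intro lines _
  unfold Spec_parse_raw_dockerfile_py parse_raw_dockerfile_py parse_raw_dockerfile_py_alt
  rw [pvFoldA_filter,
    pvFoldA_eq_pvG (lines.filter pvKeepB) [] [] (fun l hl => List.of_mem_filter hl)]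
  have h := pvFoldB_eq_pvG (lines.filter pvKeepB) [] [] 0 (by simp)
  simpa using h.symm
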